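-- pv_equiv track=rewrite | github.com/Umit-Yilmaz/Contextual-Progressive-Token-Dropping | scripts/compute_flops.py | compute_progressive_flops
-- ===== SOURCE A (Python) =====
-- def attention_flops(seq_len, d_model, num_heads):
--     """FLOPs for multi-head self-attention (one layer).
--
--     Operations:
--       Q, K, V projections:  3 * (2 * seq_len * d_model * d_model)
--       Attention scores:     2 * num_heads * seq_len * seq_len * (d_model // num_heads)
--       Attention × V:        2 * num_heads * seq_len * (d_model // num_heads) * seq_len
--       Output projection:    2 * seq_len * d_model * d_model
--     """
--     d_head = d_model // num_heads
--     qkv    = 3 * (2 * seq_len * d_model * d_model)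
--     scores = 2 * num_heads * seq_len * seq_len * d_head
--     ctx    = 2 * num_heads * seq_len * d_head * seq_len
--     proj   = 2 * seq_len * d_model * d_model
--     return qkv + scores + ctx + proj
--
-- def ffn_flops(seq_len, d_model, d_ff):
--     """FLOPs for feed-forward network (one layer).
--
--     Two linear transformations: d_model→d_ff and d_ff→d_model.
--     """
--     return 2 * (2 * seq_len * d_model * d_ff)
--
-- def layer_flops(seq_len, d_model, d_ff, num_heads):
--     """Total FLOPs for one transformer layer (attention + FFN)."""
--     return attention_flops(seq_len, d_model, num_heads) + ffn_flops(seq_len, d_model, d_ff)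
--
-- def compute_progressive_flops(num_layers, seq_len, k1, k2, k3,
--                                d_model, d_ff, num_heads):
--     """Progressive Drop BERT: 3-stage gradual token reduction + final reintegration.
--
--     Architecture (for L layers):
--       Stage 0: L//4 layers with N tokens
--       Stage 1: L//4 layers with k1 tokens
--       Stage 2: L//4 layers with k2 tokens
--       Stage 3: remaining layers with k3 tokens
--       Final:   1 layer with N tokens (reintegration)
--     """
--     total = 0
--     breakdown = []
--     stage_len = num_layers // 4
--
--     # Stage 0: full sequence
--     for i in range(stage_len):
--         f = layer_flops(seq_len, d_model, d_ff, num_heads)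
--         total += f
--         breakdown.append((f'Layer {i} (stage 0)', seq_len, f))
--
--     # Stage 1: k1 tokens
--     for i in range(stage_len):
--         idx = stage_len + i
--         f = layer_flops(k1, d_model, d_ff, num_heads)
--         total += f
--         breakdown.append((f'Layer {idx} (stage 1)', k1, f))
--
--     # Stage 2: k2 tokens
--     for i in range(stage_len):
--         idx = 2 * stage_len + i
--         f = layer_flops(k2, d_model, d_ff, num_heads)
--         total += f
--         breakdown.append((f'Layer {idx} (stage 2)', k2, f))
--
--     # Stage 3: k3 tokens
--     s3_layers = num_layers - 3 * stage_len - 1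
--     for i in range(s3_layers):
--         idx = 3 * stage_len + i
--         f = layer_flops(k3, d_model, d_ff, num_heads)
--         total += f
--         breakdown.append((f'Layer {idx} (stage 3)', k3, f))
--
--     # Final layer: reintegration (full sequence)
--     f = layer_flops(seq_len, d_model, d_ff, num_heads)
--     total += f
--     breakdown.append((f'Layer {num_layers} (final)', seq_len, f))
--
--     return total, breakdown
-- ===== SOURCE B (Python) =====
-- def compute_progressive_flops(num_layers, seq_len, k1, k2, k3,
--                                d_model, d_ff, num_heads):
--     """One pass over the contiguous layer indices 0..num_layers-2: each index is
--     classified into its stage arithmetically (min(i // stage_len, 3)) instead of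
--     running one loop per stage; the final reintegration layer is appended after
--     the pass."""
--     d_head = d_model // num_heads
--
--     def fl(t):
--         return (8 * t * d_model * d_model
--                 + 4 * num_heads * t * t * d_head
--                 + 4 * t * d_model * d_ff)
--
--     sl = num_layers // 4
--     toks = (seq_len, k1, k2, k3)
--
--     def entry(i):
--         s = min(i // sl, 3) if sl > 0 else 3
--         t = toks[s]
--         return (f'Layer {i} (stage {s})', t, fl(t))
--
--     total = 0
--     breakdown = []
--     for i in range(num_layers - 1):
--         e = entry(i)
--         total += e[2]
--         breakdown.append(e)
--     f = fl(seq_len)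
--     total += f
--     breakdown.append((f'Layer {num_layers} (final)', seq_len, f))
--     return total, breakdown
-- ===== Notes on version B (the rewrite author's own statement) =====
-- stated objective: simpler
-- what changed: Replaces A's four separate per-stage loops (each with its own index arithmetic and per-layer recomputation of the three FLOP helper functions) by a single pass over the contiguous layer indices 0..num_layers-2 that classifies each index into its stage arithmetically via min(i // stage_len, 3), with the per-layer FLOP cost collapsed to one polynomial.
-- intended difference: On num_layers = -1 A's stage-3 loop bound num_layers - 3*(num_layers//4) - 1 turns positive and A emits a spurious extra layer labelled 'Layer -3 (stage 3)' (adding its FLOPs to the total), an artefact of floor division on a negative layer count; B returns only the final reintegration layer, the intended result for this degenerate input. — e.g. on compute_progressive_flops(-1, 2, 1, 1, 1, 2, 1, 1): A returns (160, [("Layer -3 (stage 3)", 1, 48), ("Layer -1 (final)", 2, 112)]), B returns (112, [("Layer -1 (final)", 2, 112)])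
import Mathlib
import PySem

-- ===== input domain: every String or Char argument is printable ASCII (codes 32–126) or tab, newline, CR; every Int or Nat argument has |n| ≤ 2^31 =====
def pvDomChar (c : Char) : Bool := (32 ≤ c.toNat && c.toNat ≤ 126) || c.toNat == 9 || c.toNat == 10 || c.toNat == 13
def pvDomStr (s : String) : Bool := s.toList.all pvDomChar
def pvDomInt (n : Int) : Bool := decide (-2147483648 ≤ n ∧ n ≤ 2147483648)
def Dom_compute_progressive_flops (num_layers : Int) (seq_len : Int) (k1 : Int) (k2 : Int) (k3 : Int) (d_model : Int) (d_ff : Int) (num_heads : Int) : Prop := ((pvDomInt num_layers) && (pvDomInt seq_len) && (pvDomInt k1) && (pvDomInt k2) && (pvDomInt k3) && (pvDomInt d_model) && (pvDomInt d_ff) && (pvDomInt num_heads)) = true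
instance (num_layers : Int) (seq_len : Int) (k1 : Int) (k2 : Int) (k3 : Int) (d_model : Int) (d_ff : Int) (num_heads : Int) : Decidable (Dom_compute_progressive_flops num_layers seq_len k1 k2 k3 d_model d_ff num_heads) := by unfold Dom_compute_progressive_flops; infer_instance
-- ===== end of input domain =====

-- B replaces A's four per-stage loops by ONE pass over the contiguous layer indices
-- 0..num_layers-2, classifying each index into its stage arithmetically
-- (min(i // stage_len, 3)); objective: simpler.

-- ===== PORT A =====
def attention_flops (seq_len : Int) (d_model : Int) (num_heads : Int) : Int :=
  let d_head := PySem.Int.floordiv d_model num_heads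
  let qkv := 3 * (2 * seq_len * d_model * d_model)
  let scores := 2 * num_heads * seq_len * seq_len * d_head
  let ctx := 2 * num_heads * seq_len * d_head * seq_len
  let proj := 2 * seq_len * d_model * d_model
  qkv + scores + ctx + proj

def ffn_flops (seq_len : Int) (d_model : Int) (d_ff : Int) : Int :=
  2 * (2 * seq_len * d_model * d_ff)

def layer_flops (seq_len : Int) (d_model : Int) (d_ff : Int) (num_heads : Int) : Int :=
  attention_flops seq_len d_model num_heads + ffn_flops seq_len d_model d_ff

-- f-strings are ported as explicit string concatenation of their literal pieces.
def compute_progressive_flops (num_layers : Int) (seq_len : Int) (k1 : Int) (k2 : Int) (k3 : Int) (d_model : Int) (d_ff : Int) (num_heads : Int) : Int × (List (String × Int × Int)) :=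
  let stage_len := PySem.Int.floordiv num_layers 4
  -- Stage 0: full sequence
  let st0 := (PySem.List.pyRange 0 stage_len 1).foldl (fun acc i =>
      let f := layer_flops seq_len d_model d_ff num_heads
      (acc.1 + f, acc.2 ++ [("Layer " ++ PySem.Int.toStr i ++ " (stage 0)", seq_len, f)]))
    ((0 : Int), ([] : List (String × Int × Int)))
  -- Stage 1: k1 tokens
  let st1 := (PySem.List.pyRange 0 stage_len 1).foldl (fun acc i =>
      let idx := stage_len + i
      let f := layer_flops k1 d_model d_ff num_heads
      (acc.1 + f, acc.2 ++ [("Layer " ++ PySem.Int.toStr idx ++ " (stage 1)", k1, f)])) st0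
  -- Stage 2: k2 tokens
  let st2 := (PySem.List.pyRange 0 stage_len 1).foldl (fun acc i =>
      let idx := 2 * stage_len + i
      let f := layer_flops k2 d_model d_ff num_heads
      (acc.1 + f, acc.2 ++ [("Layer " ++ PySem.Int.toStr idx ++ " (stage 2)", k2, f)])) st1
  -- Stage 3: k3 tokens
  let s3_layers := num_layers - 3 * stage_len - 1
  let st3 := (PySem.List.pyRange 0 s3_layers 1).foldl (fun acc i =>
      let idx := 3 * stage_len + i
      let f := layer_flops k3 d_model d_ff num_heads
      (acc.1 + f, acc.2 ++ [("Layer " ++ PySem.Int.toStr idx ++ " (stage 3)", k3, f)])) st2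
  -- Final layer: reintegration (full sequence)
  let f := layer_flops seq_len d_model d_ff num_heads
  (st3.1 + f, st3.2 ++ [("Layer " ++ PySem.Int.toStr num_layers ++ " (final)", seq_len, f)])

-- ===== PORT B =====
-- per-layer FLOPs collapsed to one polynomial (Source B's fl)
def pvFlB (t : Int) (d_model : Int) (d_ff : Int) (num_heads : Int) : Int :=
  let d_head := PySem.Int.floordiv d_model num_heads
  8 * t * d_model * d_model + 4 * num_heads * t * t * d_head + 4 * t * d_model * d_ff

-- Source B's nested entry(i): each layer index classified by s = min(i // sl, 3)
-- (or 3 when sl <= 0); tuple indexing toks[s] with s in {0,1,2,3} is ported as the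
-- explicit 4-way branch; the f-string as explicit concatenation.
def pvEntryB (sl : Int) (seq_len : Int) (k1 : Int) (k2 : Int) (k3 : Int) (d_model : Int) (d_ff : Int) (num_heads : Int) (i : Int) : String × Int × Int :=
  let s : Int := if sl > 0 then min (PySem.Int.floordiv i sl) 3 else 3
  let t := if s = 0 then seq_len else if s = 1 then k1 else if s = 2 then k2 else k3
  ("Layer " ++ PySem.Int.toStr i ++ " (stage " ++ PySem.Int.toStr s ++ ")", t, pvFlB t d_model d_ff num_heads)

-- single pass over layer indices 0..num_layers-2
def compute_progressive_flops_alt (num_layers : Int) (seq_len : Int) (k1 : Int) (k2 : Int) (k3 : Int) (d_model : Int) (d_ff : Int) (num_heads : Int) : Int × (List (String × Int × Int)) :=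
  let sl := PySem.Int.floordiv num_layers 4
  let st := (PySem.List.pyRange 0 (num_layers - 1) 1).foldl (fun acc i =>
      let e := pvEntryB sl seq_len k1 k2 k3 d_model d_ff num_heads i
      (acc.1 + e.2.2, acc.2 ++ [e]))
    ((0 : Int), ([] : List (String × Int × Int)))
  let f := pvFlB seq_len d_model d_ff num_heads
  (st.1 + f, st.2 ++ [("Layer " ++ PySem.Int.toStr num_layers ++ " (final)", seq_len, f)])

-- ===== PRECONDITION & SPEC =====
-- Pre_ excludes only num_heads = 0, where the Python A raises ZeroDivisionError.
def Pre_compute_progressive_flops (num_layers : Int) (seq_len : Int) (k1 : Int) (k2 : Int) (k3 : Int) (d_model : Int) (d_ff : Int) (num_heads : Int) : Prop := num_heads ≠ 0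
instance (num_layers : Int) (seq_len : Int) (k1 : Int) (k2 : Int) (k3 : Int) (d_model : Int) (d_ff : Int) (num_heads : Int) : Decidable (Pre_compute_progressive_flops num_layers seq_len k1 k2 k3 d_model d_ff num_heads) := by unfold Pre_compute_progressive_flops; infer_instance

def pvWitness_compute_progressive_flops : Int × Int × Int × Int × Int × Int × Int × Int := (12, 128, 96, 64, 32, 16, 64, 4)

-- On num_layers = -1 A's stage-3 loop bound (num_layers - 3*(num_layers//4) - 1) goes
-- positive and A emits a spurious extra layer labelled 'Layer -3 (stage 3)' (adding its
-- FLOPs to the total), an artefact of floor division on a negative layer count; B returns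
-- only the final reintegration layer, the intended result for this degenerate input.
def D_compute_progressive_flops (num_layers : Int) (seq_len : Int) (k1 : Int) (k2 : Int) (k3 : Int) (d_model : Int) (d_ff : Int) (num_heads : Int) : Prop := num_layers = -1
instance (num_layers : Int) (seq_len : Int) (k1 : Int) (k2 : Int) (k3 : Int) (d_model : Int) (d_ff : Int) (num_heads : Int) : Decidable (D_compute_progressive_flops num_layers seq_len k1 k2 k3 d_model d_ff num_heads) := by unfold D_compute_progressive_flops; infer_instance

def Spec_compute_progressive_flops (num_layers : Int) (seq_len : Int) (k1 : Int) (k2 : Int) (k3 : Int) (d_model : Int) (d_ff : Int) (num_heads : Int) (out : Int × (List (String × Int × Int))) : Prop := ¬ D_compute_progressive_flops num_layers seq_len k1 k2 k3 d_model d_ff num_heads → out = compute_progressive_flops_alt num_layers seq_len k1 k2 k3 d_model d_ff num_heads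
instance (num_layers : Int) (seq_len : Int) (k1 : Int) (k2 : Int) (k3 : Int) (d_model : Int) (d_ff : Int) (num_heads : Int) (out : Int × (List (String × Int × Int))) : Decidable (Spec_compute_progressive_flops num_layers seq_len k1 k2 k3 d_model d_ff num_heads out) := by unfold Spec_compute_progressive_flops; infer_instance

def pvDiffWitness_compute_progressive_flops : Int × Int × Int × Int × Int × Int × Int × Int := (-1, 2, 1, 1, 1, 2, 1, 1)
def pvDiffWitnessOut_compute_progressive_flops : (Int × (List (String × Int × Int))) × (Int × (List (String × Int × Int))) :=
  ((160, [("Layer -3 (stage 3)", 1, 48), ("Layer -1 (final)", 2, 112)]),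
   (112, [("Layer -1 (final)", 2, 112)]))

-- ===== CLAIM (what is proved, stated in full; the proofs are below) =====
def Claim_unchanged_compute_progressive_flops : Prop := ∀ (num_layers : Int) (seq_len : Int) (k1 : Int) (k2 : Int) (k3 : Int) (d_model : Int) (d_ff : Int) (num_heads : Int), Dom_compute_progressive_flops num_layers seq_len k1 k2 k3 d_model d_ff num_heads → Pre_compute_progressive_flops num_layers seq_len k1 k2 k3 d_model d_ff num_heads → Spec_compute_progressive_flops num_layers seq_len k1 k2 k3 d_model d_ff num_heads (compute_progressive_flops num_layers seq_len k1 k2 k3 d_model d_ff num_heads)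
def Claim_changed_compute_progressive_flops : Prop := Dom_compute_progressive_flops (pvDiffWitness_compute_progressive_flops.1) (pvDiffWitness_compute_progressive_flops.2.1) (pvDiffWitness_compute_progressive_flops.2.2.1) (pvDiffWitness_compute_progressive_flops.2.2.2.1) (pvDiffWitness_compute_progressive_flops.2.2.2.2.1) (pvDiffWitness_compute_progressive_flops.2.2.2.2.2.1) (pvDiffWitness_compute_progressive_flops.2.2.2.2.2.2.1) (pvDiffWitness_compute_progressive_flops.2.2.2.2.2.2.2) ∧ Pre_compute_progressive_flops (pvDiffWitness_compute_progressive_flops.1) (pvDiffWitness_compute_progressive_flops.2.1) (pvDiffWitness_compute_progressive_flops.2.2.1) (pvDiffWitness_compute_progressive_flops.2.2.2.1) (pvDiffWitness_compute_progressive_flops.2.2.2.2.1) (pvDiffWitness_compute_progressive_flops.2.2.2.2.2.1) (pvDiffWitness_compute_progressive_flops.2.2.2.2.2.2.1) (pvDiffWitness_compute_progressive_flops.2.2.2.2.2.2.2) ∧ D_compute_progressive_flops (pvDiffWitness_compute_progressive_flops.1) (pvDiffWitness_compute_progressive_flops.2.1) (pvDiffWitness_compute_progressive_flops.2.2.1)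 (pvDiffWitness_compute_progressive_flops.2.2.2.1) (pvDiffWitness_compute_progressive_flops.2.2.2.2.1) (pvDiffWitness_compute_progressive_flops.2.2.2.2.2.1) (pvDiffWitness_compute_progressive_flops.2.2.2.2.2.2.1) (pvDiffWitness_compute_progressive_flops.2.2.2.2.2.2.2) ∧ compute_progressive_flops (pvDiffWitness_compute_progressive_flops.1) (pvDiffWitness_compute_progressive_flops.2.1) (pvDiffWitness_compute_progressive_flops.2.2.1) (pvDiffWitness_compute_progressive_flops.2.2.2.1) (pvDiffWitness_compute_progressive_flops.2.2.2.2.1) (pvDiffWitness_compute_progressive_flops.2.2.2.2.2.1) (pvDiffWitness_compute_progressive_flops.2.2.2.2.2.2.1) (pvDiffWitness_compute_progressive_flops.2.2.2.2.2.2.2) = pvDiffWitnessOut_compute_progressive_flops.1 ∧ compute_progressive_flops_alt (pvDiffWitness_compute_progressive_flops.1) (pvDiffWitness_compute_progressive_flops.2.1) (pvDiffWitness_compute_progressive_flops.2.2.1) (pvDiffWitness_compute_progressive_flops.2.2.2.1) (pvDiffWitness_compute_progressive_flops.2.2.2.2.1) (pvDiffWitness_compute_progressive_flops.2.2.2.2.2.1)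 (pvDiffWitness_compute_progressive_flops.2.2.2.2.2.2.1) (pvDiffWitness_compute_progressive_flops.2.2.2.2.2.2.2) = pvDiffWitnessOut_compute_progressive_flops.2 ∧ pvDiffWitnessOut_compute_progressive_flops.1 ≠ pvDiffWitnessOut_compute_progressive_flops.2
def Claim_exact_compute_progressive_flops : Prop := ∀ (num_layers : Int) (seq_len : Int) (k1 : Int) (k2 : Int) (k3 : Int) (d_model : Int) (d_ff : Int) (num_heads : Int), Dom_compute_progressive_flops num_layers seq_len k1 k2 k3 d_model d_ff num_heads → Pre_compute_progressive_flops num_layers seq_len k1 k2 k3 d_model d_ff num_heads → D_compute_progressive_flops num_layers seq_len k1 k2 k3 d_model d_ff num_heads → compute_progressive_flops num_layers seq_len k1 k2 k3 d_model d_ff num_heads ≠ compute_progressive_flops_alt num_layers seq_len k1 k2 k3 d_model d_ff num_heads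

-- ===== LEMMAS AND PROOFS =====

-- the loop shape shared by every stage loop: two accumulators, constant-per-iteration sum and an append
theorem pv_fold {α : Type} (l : List Int) (f : Int → Int) (g : Int → α) (t0 : Int) (b0 : List α) :
    l.foldl (fun acc i => (acc.1 + f i, acc.2 ++ [g i])) (t0, b0) = (t0 + (l.map f).sum, b0 ++ l.map g) := by
  induction l generalizing t0 b0 with
  | nil => simp
  | cons x xs ih => simp [List.foldl_cons, ih, add_assoc]

-- A's attention+FFN FLOPs and B's collapsed polynomial agree.
theorem pv_flops_eq (t d ff h : Int) : layer_flops t d ff h = pvFlB t d ff h := by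
  simp only [layer_flops, attention_flops, ffn_flops, pvFlB]; ring

-- string-label regrouping
theorem pv_lab (x : String) (d r : String) (h : " (stage " ++ (d ++ ")") = r) :
    "Layer " ++ x ++ " (stage " ++ d ++ ")" = "Layer " ++ x ++ r := by
  rw [← h]; simp only [String.append_assoc]

-- reindexing a mapped range to start at 0
theorem pv_seg {α : Type} (a b : Int) (g g' : Int → α)
    (hpt : ∀ i : Int, a ≤ i → i < b → g i = g' (i - a)) :
    (PySem.List.pyRange a b 1).map g = (PySem.List.pyRange 0 (b - a) 1).map g' := by
  rw [PySem.List.pyRange_one, PySem.List.pyRange_one]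
  simp only [List.map_map, sub_zero]
  refine List.map_congr_left ?_
  intro k hk
  rw [List.mem_range] at hk
  have hk' : (k : Int) < b - a := by omega
  have := hpt (a + k) (by omega) (by omega)
  simpa using this.trans (by norm_num)

-- ===== VERDICT =====
theorem compute_progressive_flops_spec : Claim_unchanged_compute_progressive_flops := by
  intro nl seq k1 k2 k3 dm dff nh _hDom _hPre hD
  simp only [D_compute_progressive_flops] at hD
  simp only [compute_progressive_flops, compute_progressive_flops_alt, pv_fold, pv_flops_eq]
  have h4 := PySem.Int.floordiv_mul_add_mod nl 4
  have hm0 := PySem.Int.mod_nonneg nl (b := 4) (by norm_num)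
  have hm4 := PySem.Int.mod_lt nl (b := 4) (by norm_num)
  set sl := PySem.Int.floordiv nl 4 with hsl
  have key : (PySem.List.pyRange 0 (nl - 1) 1).map (fun i => pvEntryB sl seq k1 k2 k3 dm dff nh i)
      = (PySem.List.pyRange 0 sl 1).map (fun i => ("Layer " ++ PySem.Int.toStr i ++ " (stage 0)", seq, pvFlB seq dm dff nh))
        ++ ((PySem.List.pyRange 0 sl 1).map (fun i => ("Layer " ++ PySem.Int.toStr (sl + i) ++ " (stage 1)", k1, pvFlB k1 dm dff nh))
        ++ ((PySem.List.pyRange 0 sl 1).map (fun i => ("Layer " ++ PySem.Int.toStr (2 * sl + i) ++ " (stage 2)", k2, pvFlB k2 dm dff nh))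
        ++ (PySem.List.pyRange 0 (nl - 3 * sl - 1) 1).map (fun i => ("Layer " ++ PySem.Int.toStr (3 * sl + i) ++ " (stage 3)", k3, pvFlB k3 dm dff nh)))) := by
    by_cases hpos : 0 < sl
    · rw [PySem.List.pyRange_one_append 0 sl (nl - 1) (by omega) (by omega),
          PySem.List.pyRange_one_append sl (2 * sl) (nl - 1) (by omega) (by omega),
          PySem.List.pyRange_one_append (2 * sl) (3 * sl) (nl - 1) (by omega) (by omega),
          List.map_append, List.map_append, List.map_append]
      congr 1
      · refine List.map_congr_left ?_
        intro i hi
        rw [PySem.List.mem_pyRange_one] at hi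
        have hfd : PySem.Int.floordiv i sl = 0 :=
          (PySem.Int.floordiv_eq_iff_of_pos hpos).mpr ⟨by omega, by omega⟩
        simp only [pvEntryB, hfd, if_pos hpos]
        norm_num
        exact pv_lab (PySem.Int.toStr i) (PySem.Int.toStr 0) " (stage 0)" (by decide)
      congr 1
      · rw [pv_seg sl (2 * sl) _ (fun i => ("Layer " ++ PySem.Int.toStr (sl + i) ++ " (stage 1)", k1, pvFlB k1 dm dff nh)) ?_ ]
        · have h2 : 2 * sl - sl = sl := by ring
          rw [h2]
        · intro i h1 h2
          have hfd : PySem.Int.floordiv i sl = 1 :=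
            (PySem.Int.floordiv_eq_iff_of_pos hpos).mpr ⟨by omega, by omega⟩
          have hadd : sl + (i - sl) = i := by ring
          simp only [pvEntryB, hfd, if_pos hpos, hadd]
          norm_num
          exact pv_lab (PySem.Int.toStr i) (PySem.Int.toStr 1) " (stage 1)" (by decide)
      congr 1
      · rw [pv_seg (2 * sl) (3 * sl) _ (fun i => ("Layer " ++ PySem.Int.toStr (2 * sl + i) ++ " (stage 2)", k2, pvFlB k2 dm dff nh)) ?_ ]
        · have h2 : 3 * sl - 2 * sl = sl := by ring
          rw [h2]
        · intro i h1 h2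
          have hfd : PySem.Int.floordiv i sl = 2 :=
            (PySem.Int.floordiv_eq_iff_of_pos hpos).mpr ⟨by omega, by omega⟩
          have hadd : 2 * sl + (i - 2 * sl) = i := by ring
          simp only [pvEntryB, hfd, if_pos hpos, hadd]
          norm_num
          exact pv_lab (PySem.Int.toStr i) (PySem.Int.toStr 2) " (stage 2)" (by decide)
      · rw [pv_seg (3 * sl) (nl - 1) _ (fun i => ("Layer " ++ PySem.Int.toStr (3 * sl + i) ++ " (stage 3)", k3, pvFlB k3 dm dff nh)) ?_ ]
        · have h2 : nl - 1 - 3 * sl = nl - 3 * sl - 1 := by ring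
          rw [h2]
        · intro i h1 h2
          have hge : (3 : Int) ≤ PySem.Int.floordiv i sl :=
            (PySem.Int.le_floordiv_iff_mul_le hpos).mpr (by omega)
          have hmin : min (PySem.Int.floordiv i sl) 3 = 3 := min_eq_right hge
          have hadd : 3 * sl + (i - 3 * sl) = i := by ring
          simp only [pvEntryB, hmin, if_pos hpos, hadd]
          norm_num
          exact pv_lab (PySem.Int.toStr i) (PySem.Int.toStr 3) " (stage 3)" (by decide)
    · -- sl ≤ 0: the three quarter stages are empty
      have hsl0 : sl ≤ 0 := by omega
      rw [PySem.List.pyRange_one_eq_nil hsl0]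
      by_cases h1 : 1 ≤ nl
      · -- nl ∈ {1,2,3}: sl = 0, everything is stage 3
        have hz : sl = 0 := by omega
        simp only [hz, mul_zero, zero_add, sub_zero]
        refine List.map_congr_left ?_
        intro i _hi
        simp only [pvEntryB, if_neg (by norm_num : ¬ (0 : Int) > 0)]
        norm_num
        exact pv_lab (PySem.Int.toStr i) (PySem.Int.toStr 3) " (stage 3)" (by decide)
      · -- nl ≤ 0 and nl ≠ -1: every range is empty
        have hs3 : nl - 3 * sl - 1 ≤ 0 := by omega
        rw [PySem.List.pyRange_one_eq_nil (by omega : nl - 1 ≤ 0),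
            PySem.List.pyRange_one_eq_nil hs3]
        simp
  simp only [Prod.mk.injEq]
  constructor
  · rw [show (fun i => (pvEntryB sl seq k1 k2 k3 dm dff nh i).2.2)
        = ((fun e => e.2.2) ∘ (fun i => pvEntryB sl seq k1 k2 k3 dm dff nh i)) from rfl,
       ← List.map_map, key]
    simp only [List.map_append, List.sum_append, List.map_map, Function.comp_def,
               PySem.List.sum_map_const_int]
    ring
  · rw [key]
    simp [List.append_assoc]

theorem compute_progressive_flops_changed : Claim_changed_compute_progressive_flops := by
  unfold Claim_changed_compute_progressive_flops; decide

theorem compute_progressive_flops_tight : Claim_exact_compute_progressive_flops := by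
  intro nl seq k1 k2 k3 dm dff nh _hDom _hPre hD heq
  simp only [D_compute_progressive_flops] at hD
  subst hD
  have hlen := congrArg (fun p => p.2.length) heq
  have e1 : PySem.List.pyRange 0 (-1) 1 = [] := by decide
  simp [compute_progressive_flops, compute_progressive_flops_alt, pv_fold, e1] at hlen
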